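-- pv_equiv track=rewrite | github.com/chanzuckerberg/miniwdl-viz | miniwdl_viz/mermaid_wdl.py | group_edge
-- ===== SOURCE A (Python) =====
-- def group_edge(edges):
--     grouped = {}
--     seen = set()
--
--     for edge in edges:
--         edge_id_tuple = (edge["node_from"], edge["node_to"])
--         seen_tuple = (*edge_id_tuple, edge["task_ref_name"])
--
--         if edge_id_tuple in grouped:
--             if seen_tuple not in seen:
--                 grouped[edge_id_tuple][
--                     "task_ref_name"
--                 ] += f", {edge['task_ref_name']}"
--         else:
--             grouped[edge_id_tuple] = edge
--         seen.add(seen_tuple)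
--
--     return list(grouped.values())
-- ===== SOURCE B (Python) =====
-- def group_edge(edges):
--     # Staged per-key rescan instead of single-pass dict grouping: for each edge whose
--     # (node_from, node_to) key has not been handled yet, rescan the whole list to
--     # collect that key's distinct task_ref_names in order, set the joined string on
--     # that first edge (in place) and emit it.  No dict, no global seen-set.
--     result = []
--     keys_done = []
--     for edge in edges:
--         key = (edge["node_from"], edge["node_to"])
--         if key in keys_done:
--             continue
--         keys_done.append(key)
--         names = []
--         for e in edges:
--             if (e["node_from"], e["node_to"]) == key and e["task_ref_name"] not in names:
--                 names.append(e["task_ref_name"])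
--         edge["task_ref_name"] = ", ".join(names)
--         result.append(edge)
--     return result
-- ===== Notes on version B (the rewrite author's own statement) =====
-- stated objective: alternative
-- what changed: Replaces A's single-pass dict grouping with a global seen-set and incremental '+=' concatenation by a per-unique-key rescan: for each first occurrence of a (node_from, node_to) key, rescan the whole edge list to collect that key's ordered-distinct task_ref_names and join them once; no dict and no seen-set are maintained.
-- outside the precondition, e.g. on group_edge([{'node_from': 'a'}]): A raises KeyError, B raises KeyError
import Mathlib
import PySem

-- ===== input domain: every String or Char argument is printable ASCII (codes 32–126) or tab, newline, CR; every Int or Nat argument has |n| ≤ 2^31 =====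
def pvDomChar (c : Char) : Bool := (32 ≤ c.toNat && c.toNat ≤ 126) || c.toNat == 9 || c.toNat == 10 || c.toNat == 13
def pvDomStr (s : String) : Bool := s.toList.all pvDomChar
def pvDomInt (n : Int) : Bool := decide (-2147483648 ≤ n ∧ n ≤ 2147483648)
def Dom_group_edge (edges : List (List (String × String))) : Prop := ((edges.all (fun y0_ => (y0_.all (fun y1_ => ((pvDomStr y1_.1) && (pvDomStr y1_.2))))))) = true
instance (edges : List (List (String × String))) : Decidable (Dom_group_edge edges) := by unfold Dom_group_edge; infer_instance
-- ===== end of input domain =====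

-- B replaces A's single-pass dict grouping (with a global seen-set and incremental '+=') by a
-- per-unique-key rescan of the whole list that collects each key's ordered-distinct names and
-- joins them once.  Equivalence is about the RETURN value; both Pythons mutate the first edge
-- dict of each group in place (B also rewrites its task_ref_name for singleton groups).

-- ===== PORT A =====
-- one iteration of A's loop: state = (grouped, seen)
def groupEdgeStepA
    (st : PySem.Dict (String × String) (PySem.Dict String String) × PySem.Set (String × String × String))
    (edge : List (String × String)) :
    PySem.Dict (String × String) (PySem.Dict String String) × PySem.Set (String × String × String) :=
  let e := PySem.Dict.ofList edge
  let grouped := st.1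
  let seen := st.2
  let edgeIdTuple := (e.getD "node_from" "", e.getD "node_to" "")
  let seenTuple : String × String × String := (edgeIdTuple.1, edgeIdTuple.2, e.getD "task_ref_name" "")
  let grouped' :=
    if grouped.contains edgeIdTuple then
      if PySem.Set.contains seen seenTuple then grouped
      else
        grouped.modify edgeIdTuple PySem.Dict.empty
          (fun g => g.insert "task_ref_name"
            (g.getD "task_ref_name" "" ++ ", " ++ e.getD "task_ref_name" ""))
    else grouped.insert edgeIdTuple e
  (grouped', seen.add seenTuple)

def group_edge (edges : List (List (String × String))) : List (List (String × String)) :=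
  ((edges.foldl groupEdgeStepA (PySem.Dict.empty, PySem.Set.empty)).1.values).map PySem.Dict.items

-- ===== PORT B =====
-- the key tuple and the task_ref_name lookup of one edge dict
def geKeyOf (edge : List (String × String)) : String × String :=
  ((PySem.Dict.ofList edge).getD "node_from" "", (PySem.Dict.ofList edge).getD "node_to" "")
def geTrOf (edge : List (String × String)) : String :=
  (PySem.Dict.ofList edge).getD "task_ref_name" ""

-- B's inner rescan: the ordered-distinct task_ref_names ('names' list kept duplicate-free)
def geCollectNames (edges : List (List (String × String))) (key : String × String) : PySem.Set String :=
  edges.foldl (fun names e => if geKeyOf e == key then names.add (geTrOf e) else names) PySem.Set.empty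

-- one iteration of B's outer loop: state = (result, keys_done)
def geStepB (edges : List (List (String × String)))
    (st : List (List (String × String)) × List (String × String))
    (edge : List (String × String)) :
    List (List (String × String)) × List (String × String) :=
  let key := geKeyOf edge
  if key ∈ st.2 then st
  else
    let names := geCollectNames edges key
    (st.1 ++ [((PySem.Dict.ofList edge).insert "task_ref_name" (PySem.Str.join ", " names)).items],
     st.2 ++ [key])

def group_edge_alt (edges : List (List (String × String))) : List (List (String × String)) :=
  (edges.foldl (geStepB edges) ([], [])).1

-- ===== PRECONDITION & SPEC =====
-- Pre_ excludes exactly the inputs on which A raises KeyError: an edge dict missing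
-- one of the three keys "node_from", "node_to", "task_ref_name" it is subscripted with.
def Pre_group_edge (edges : List (List (String × String))) : Prop :=
  -- e.g. the one-edge input [[("node_from", "a"), ("node_to", "b")]] is excluded:
  -- its edge dict has no "task_ref_name" key, so A raises KeyError on it
  ∀ edge ∈ edges,
    "node_from" ∈ edge.map Prod.fst ∧ "node_to" ∈ edge.map Prod.fst ∧
      "task_ref_name" ∈ edge.map Prod.fst
instance (edges : List (List (String × String))) : Decidable (Pre_group_edge edges) := by
  unfold Pre_group_edge; infer_instance

def pvWitness_group_edge : List (List (String × String)) :=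
  [[("node_from", "a"), ("node_to", "b"), ("task_ref_name", "x")],
   [("node_from", "a"), ("node_to", "b"), ("task_ref_name", "y")]]

def Spec_group_edge (edges : List (List (String × String))) (out : List (List (String × String))) : Prop :=
  out = group_edge_alt edges
instance (edges : List (List (String × String))) (out : List (List (String × String))) : Decidable (Spec_group_edge edges out) := by unfold Spec_group_edge; infer_instance

-- ===== CLAIM (what is proved, stated in full; the proofs are below) =====
def Claim_equal_group_edge : Prop := ∀ (edges : List (List (String × String))), Dom_group_edge edges → Pre_group_edge edges → Spec_group_edge edges (group_edge edges)

-- ===== LEMMAS AND PROOFS =====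

-- proof-only middle layer: a grouping dict carrying (first edge, ordered-distinct names)
def groupEdgeCollectB
    (gs : PySem.Dict (String × String) (PySem.Dict String String × PySem.Set String))
    (edge : List (String × String)) :
    PySem.Dict (String × String) (PySem.Dict String String × PySem.Set String) :=
  match gs.get? (geKeyOf edge) with
  | some (firstEdge, names) => gs.insert (geKeyOf edge) (firstEdge, names.add (geTrOf edge))
  | none => gs.insert (geKeyOf edge) (PySem.Dict.ofList edge, PySem.Set.ofList [geTrOf edge])

-- a group's data rendered as A's per-group dict
def geRender (p : (String × String) × (PySem.Dict String String × PySem.Set String)) :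
    (String × String) × PySem.Dict String String :=
  (p.1, p.2.1.insert "task_ref_name" (PySem.Str.join ", " p.2.2))

-- the loop invariant tying A's state (gA, seen) to the middle layer's state gB
def geInv (gA : PySem.Dict (String × String) (PySem.Dict String String))
    (seen : PySem.Set (String × String × String))
    (gB : PySem.Dict (String × String) (PySem.Dict String String × PySem.Set String)) : Prop :=
  gA.items = gB.items.map geRender ∧
  gB.keys.Nodup ∧
  (∀ p ∈ gB.items, p.2.2 ≠ [] ∧ p.2.2.Nodup) ∧
  (∀ k1 k2 n, (k1, k2, n) ∈ seen ↔
    ∃ fe ns, ((k1, k2), (fe, ns)) ∈ gB.items ∧ n ∈ ns)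

theorem ge_items_unique {κ ν : Type} [BEq κ] [LawfulBEq κ] (d : PySem.Dict κ ν)
    (hnd : d.keys.Nodup) {p q : κ × ν} (hp : p ∈ d.items) (hq : q ∈ d.items)
    (h : p.1 = q.1) : p = q := by
  have h1 := PySem.Dict.get?_of_mem_items d (k := p.1) (v := p.2) hp hnd
  have h2 := PySem.Dict.get?_of_mem_items d (k := q.1) (v := q.2) hq hnd
  rw [h] at h1; rw [h1] at h2
  exact Prod.ext h (by exact Option.some.inj h2)

theorem ge_insert_self {κ ν : Type} [BEq κ] [LawfulBEq κ] (d : PySem.Dict κ ν)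
    {k : κ} {v : ν} (hnd : d.keys.Nodup) (h : d.get? k = some v) : d.insert k v = d := by
  have hc : d.contains k = true := by rw [PySem.Dict.contains_eq_isSome_get?, h]; rfl
  apply PySem.Dict.ext
  rw [PySem.Dict.items_insert_of_contains d v hc]
  have : ∀ p ∈ d.items, (if (p.1 == k) = true then (k, v) else p) = id p := by
    intro p hp
    by_cases hk : p.1 = k
    · simp only [hk, BEq.rfl, if_true, id]
      have := ge_items_unique d hnd hp (PySem.Dict.mem_items_of_get?_eq_some d h) hk
      exact this.symm
    · simp [hk]
  rw [List.map_congr_left this, List.map_id]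

theorem ge_join_singleton (x : String) : PySem.Str.join ", " [x] = x := by
  apply String.toList_inj.mp
  simp [PySem.Str.join, PySem.Chars.join_singleton]

theorem ge_join_snoc (ns : List String) (hns : ns ≠ []) (x : String) :
    PySem.Str.join ", " (ns ++ [x]) = PySem.Str.join ", " ns ++ ", " ++ x := by
  apply String.toList_inj.mp
  simp only [PySem.Str.join, String.toList_ofList, String.toList_append]
  induction ns with
  | nil => exact absurd rfl hns
  | cons a t ih =>
    cases t with
    | nil => simp [PySem.Chars.join, List.intercalate]
    | cons b t' =>
      simp only [List.cons_append, PySem.Chars.join, List.intercalate] at *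
      simp only [List.map_cons, List.intersperse, List.flatten] at *
      rw [ih (by simp)]
      simp [List.append_assoc]

theorem ge_mem_keys_ofList (l : List (String × String)) (k : String) :
    k ∈ (PySem.Dict.ofList l).keys ↔ k ∈ l.map Prod.fst := by
  show k ∈ (l.foldl (fun d p => d.insert p.1 p.2) PySem.Dict.empty).keys ↔ _
  rw [PySem.Dict.keys_foldl_insert_key l Prod.fst (fun d p => p.2) PySem.Dict.empty,
    show (PySem.Dict.empty : PySem.Dict String String).keys = [] from rfl,
    PySem.Set.update_nil_left, PySem.Set.mem_ofList]

-- under Pre_, the three lookups of an edge succeed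
theorem ge_getD_of_pre (edge : List (String × String)) (k : String)
    (hk : k ∈ edge.map Prod.fst) :
    (PySem.Dict.ofList edge).get? k = some ((PySem.Dict.ofList edge).getD k "") := by
  cases hg : (PySem.Dict.ofList edge).get? k with
  | none =>
    refine absurd ((PySem.Dict.get?_eq_none_iff_not_mem_keys _ k).mp hg) (fun h => h ?_)
    exact (ge_mem_keys_ofList edge k).mpr hk
  | some v => rw [PySem.Dict.getD_eq_get?_getD, hg]; rfl

-- one step of A's loop and of the middle layer preserves the invariant
theorem ge_step (gA : PySem.Dict (String × String) (PySem.Dict String String))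
    (seen : PySem.Set (String × String × String))
    (gB : PySem.Dict (String × String) (PySem.Dict String String × PySem.Set String))
    (edge : List (String × String))
    (hpre : "node_from" ∈ edge.map Prod.fst ∧ "node_to" ∈ edge.map Prod.fst ∧
      "task_ref_name" ∈ edge.map Prod.fst)
    (hinv : geInv gA seen gB) :
    geInv (groupEdgeStepA (gA, seen) edge).1 (groupEdgeStepA (gA, seen) edge).2
      (groupEdgeCollectB gB edge) := by
  obtain ⟨hmap, hnd, hns, hseen⟩ := hinv
  obtain ⟨hkf, hkt, hkr⟩ := hpre
  have hkeys : gA.keys = gB.keys := by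
    simp only [PySem.Dict.keys, hmap, List.map_map]
    exact List.map_congr_left fun p _ => rfl
  have hndA : gA.keys.Nodup := hkeys ▸ hnd
  have hnde : (PySem.Dict.ofList edge).keys.Nodup := PySem.Dict.nodup_keys_ofList edge
  simp only [groupEdgeStepA, groupEdgeCollectB, geKeyOf, geTrOf]
  set nf := (PySem.Dict.ofList edge).getD "node_from" "" with hnf
  set nt := (PySem.Dict.ofList edge).getD "node_to" "" with hnt
  set tr := (PySem.Dict.ofList edge).getD "task_ref_name" "" with htr
  have hgetE : (PySem.Dict.ofList edge).get? "task_ref_name" = some tr := ge_getD_of_pre edge _ hkr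
  cases hg : gB.get? (nf, nt) with
  | none =>
    have hcB : gB.contains (nf, nt) = false := by
      rw [PySem.Dict.contains_eq_isSome_get?, hg]; rfl
    have hgA : gA.get? (nf, nt) = none := by
      rw [PySem.Dict.get?_eq_none_iff_not_mem_keys, hkeys]
      exact (PySem.Dict.get?_eq_none_iff_not_mem_keys gB (nf, nt)).mp hg
    have hcA : gA.contains (nf, nt) = false := by
      rw [PySem.Dict.contains_eq_isSome_get?, hgA]; rfl
    simp only [hcA, Bool.false_eq_true, if_false]
    refine ⟨?_, PySem.Dict.nodup_keys_insert _ _ _ hnd, ?_, ?_⟩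
    · rw [PySem.Dict.items_insert_of_not_contains _ _ hcA,
        PySem.Dict.items_insert_of_not_contains _ _ hcB, List.map_append, hmap]
      congr 1
      simp only [List.map_cons, List.map_nil, geRender]
      rw [show PySem.Set.ofList [tr] = [tr] from rfl, ge_join_singleton,
        ge_insert_self _ hnde hgetE]
    · intro p hp
      rw [PySem.Dict.items_insert_of_not_contains _ _ hcB, List.mem_append] at hp
      rcases hp with hp | hp
      · exact hns p hp
      · simp only [List.mem_singleton] at hp
        subst hp
        rw [show PySem.Set.ofList [tr] = [tr] from rfl]
        exact ⟨by simp, by simp⟩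
    · intro k1 k2 n
      rw [PySem.Set.mem_add, PySem.Dict.items_insert_of_not_contains _ _ hcB]
      constructor
      · rintro (h | h)
        · obtain ⟨fe, ns, hm, hn⟩ := (hseen k1 k2 n).mp h
          exact ⟨fe, ns, List.mem_append_left _ hm, hn⟩
        · injection h with h1 h23
          injection h23 with h2 h3
          subst h1; subst h2; subst h3
          exact ⟨PySem.Dict.ofList edge, PySem.Set.ofList [tr],
            List.mem_append_right _ (by simp), by simp [PySem.Set.mem_ofList]⟩
      · rintro ⟨fe, ns, hm, hn⟩
        rw [List.mem_append] at hm
        rcases hm with hm | hm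
        · exact Or.inl ((hseen k1 k2 n).mpr ⟨fe, ns, hm, hn⟩)
        · simp only [List.mem_singleton, Prod.mk.injEq] at hm
          obtain ⟨⟨h1, h2⟩, h3, h4⟩ := hm
          subst h1; subst h2; subst h4
          simp only [PySem.Set.mem_ofList, List.mem_singleton] at hn
          exact Or.inr (by rw [hn])
  | some v =>
    obtain ⟨fe, ns⟩ := v
    have hcB : gB.contains (nf, nt) = true := by
      rw [PySem.Dict.contains_eq_isSome_get?, hg]; rfl
    have hmemB : ((nf, nt), (fe, ns)) ∈ gB.items := PySem.Dict.mem_items_of_get?_eq_some gB hg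
    have hmemA : ((nf, nt), fe.insert "task_ref_name" (PySem.Str.join ", " ns)) ∈ gA.items := by
      rw [hmap]; exact List.mem_map_of_mem hmemB
    have hgA : gA.get? (nf, nt) =
        some (fe.insert "task_ref_name" (PySem.Str.join ", " ns)) :=
      PySem.Dict.get?_of_mem_items gA hmemA hndA
    have hcA : gA.contains (nf, nt) = true := by
      rw [PySem.Dict.contains_eq_isSome_get?, hgA]; rfl
    obtain ⟨hne, hnsnd⟩ := hns _ hmemB
    by_cases hmem : tr ∈ ns
    · have hsc : PySem.Set.contains seen (nf, nt, tr) = true :=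
        (PySem.Set.contains_iff seen _).mpr ((hseen nf nt tr).mpr ⟨fe, ns, hmemB, hmem⟩)
      have hadd : seen.add (nf, nt, tr) = seen := by
        simp [PySem.Set.add, PySem.Set.contains] at hsc ⊢
        simp [hsc]
      have hnsadd : PySem.Set.add ns tr = ns := by
        have : PySem.Set.contains ns tr = true := (PySem.Set.contains_iff ns tr).mpr hmem
        simp [PySem.Set.add, PySem.Set.contains] at this ⊢
        simp [this]
      simp only [hcA, hsc, if_true, hadd, hnsadd, ge_insert_self gB hnd hg]
      exact ⟨hmap, hnd, hns, hseen⟩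
    · have hsc : PySem.Set.contains seen (nf, nt, tr) = false := by
        rw [Bool.eq_false_iff]
        intro h
        obtain ⟨fe', ns', hm', hn'⟩ := (hseen nf nt tr).mp ((PySem.Set.contains_iff seen _).mp h)
        have heq := ge_items_unique gB hnd hm' hmemB rfl
        injection heq with h1 h2
        injection h2 with hfe hnseq
        exact hmem (hnseq ▸ hn')
      have hnsadd : PySem.Set.add ns tr = ns ++ [tr] := by
        have : PySem.Set.contains ns tr = false := by
          rw [Bool.eq_false_iff]; exact fun h => hmem ((PySem.Set.contains_iff ns tr).mp h)
        simp [PySem.Set.add, PySem.Set.contains] at this ⊢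
        simp [this]
      have hvA : (gA.modify (nf, nt) PySem.Dict.empty
          (fun g => g.insert "task_ref_name" (g.getD "task_ref_name" "" ++ ", " ++ tr))) =
          gA.insert (nf, nt) (fe.insert "task_ref_name" (PySem.Str.join ", " (ns ++ [tr]))) := by
        simp only [PySem.Dict.modify, PySem.Dict.getD_eq_get?_getD, hgA, Option.getD_some,
          PySem.Dict.get?_insert_self,
          PySem.Dict.insert_insert_self]
        rw [ge_join_snoc ns hne tr]
      simp only [hcA, hsc, if_true, Bool.false_eq_true, if_false, hnsadd, hvA]
      refine ⟨?_, PySem.Dict.nodup_keys_insert _ _ _ hnd, ?_, ?_⟩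
      · rw [PySem.Dict.items_insert_of_contains _ _ hcA,
          PySem.Dict.items_insert_of_contains _ _ hcB, hmap, List.map_map, List.map_map]
        apply List.map_congr_left
        intro p hp
        by_cases hpk : p.1 = (nf, nt)
        · have hpe := ge_items_unique gB hnd hp hmemB hpk
          subst hpe
          simp [geRender]
        · have hbe : (p.1 == (nf, nt)) = false := by simp [hpk]
          simp [Function.comp, geRender, hbe]
      · intro p hp
        rw [PySem.Dict.mem_items_insert] at hp
        rcases hp with hp | hp
        · subst hp
          refine ⟨by simp, List.Nodup.append hnsnd (List.nodup_singleton tr) ?_⟩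
          intro x hx hx'
          simp only [List.mem_singleton] at hx'
          subst hx'
          exact hmem hx
        · exact hns p hp.1
      · intro k1 k2 n
        rw [PySem.Set.mem_add]
        constructor
        · rintro (h | h)
          · obtain ⟨fe', ns', hm', hn'⟩ := (hseen k1 k2 n).mp h
            by_cases h' : (k1, k2) = (nf, nt)
            · have hpe := ge_items_unique gB hnd hm' hmemB h'
              injection hpe with h1 h2
              injection h2 with hfe hnseq
              refine ⟨fe, ns ++ [tr], (PySem.Dict.mem_items_insert ..).mpr (Or.inl (by rw [h'])),
                List.mem_append_left _ (hnseq ▸ hn')⟩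
            · exact ⟨fe', ns', (PySem.Dict.mem_items_insert ..).mpr (Or.inr ⟨hm', h'⟩), hn'⟩
          · injection h with h1 h23
            injection h23 with h2 h3
            subst h1; subst h2; subst h3
            exact ⟨fe, ns ++ [tr], (PySem.Dict.mem_items_insert ..).mpr (Or.inl rfl),
              List.mem_append_right _ (by simp)⟩
        · rintro ⟨fe', ns', hm', hn'⟩
          rw [PySem.Dict.mem_items_insert] at hm'
          rcases hm' with hm' | hm'
          · injection hm' with h12 h34
            injection h12 with h1 h2
            injection h34 with h3 h4
            rcases List.mem_append.mp (h4 ▸ hn') with hn | hn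
            · exact Or.inl ((hseen k1 k2 n).mpr ⟨fe, ns, by rw [h1, h2]; exact hmemB, hn⟩)
            · simp only [List.mem_singleton] at hn
              exact Or.inr (by rw [h1, h2, hn])
          · exact Or.inl ((hseen k1 k2 n).mpr ⟨fe', ns', hm'.1, hn'⟩)

theorem ge_fold (edges : List (List (String × String)))
    (gA : PySem.Dict (String × String) (PySem.Dict String String))
    (seen : PySem.Set (String × String × String))
    (gB : PySem.Dict (String × String) (PySem.Dict String String × PySem.Set String))
    (hpre : Pre_group_edge edges) (hinv : geInv gA seen gB) :
    (edges.foldl groupEdgeStepA (gA, seen)).1.items =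
      (edges.foldl groupEdgeCollectB gB).items.map geRender := by
  induction edges generalizing gA seen gB with
  | nil => exact hinv.1
  | cons e t ih =>
    simp only [List.foldl_cons]
    have hstep := ge_step gA seen gB e (hpre e (by simp)) hinv
    have : groupEdgeStepA (gA, seen) e =
        ((groupEdgeStepA (gA, seen) e).1, (groupEdgeStepA (gA, seen) e).2) := rfl
    rw [this]
    exact ih _ _ _ (fun x hx => hpre x (by simp [hx])) hstep

-- ===== the common characterization: groups of the remaining list, given already-done keys =====

def geCollectInto (ns : PySem.Set String) (k : String × String) :
    List (List (String × String)) → PySem.Set String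
  | [] => ns
  | e :: t => geCollectInto (if geKeyOf e == k then ns.add (geTrOf e) else ns) k t

def geNewGroups (ks : List (String × String)) :
    List (List (String × String)) →
      List ((String × String) × (PySem.Dict String String × PySem.Set String))
  | [] => []
  | e :: t =>
    if geKeyOf e ∈ ks then geNewGroups ks t
    else (geKeyOf e, (PySem.Dict.ofList e, geCollectInto (PySem.Set.ofList [geTrOf e]) (geKeyOf e) t)) ::
      geNewGroups (ks ++ [geKeyOf e]) t

theorem ge_collectInto_foldl (ns : PySem.Set String) (k : String × String)
    (l : List (List (String × String))) :
    geCollectInto ns k l =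
      l.foldl (fun acc e => if geKeyOf e == k then acc.add (geTrOf e) else acc) ns := by
  induction l generalizing ns with
  | nil => rfl
  | cons e t ih => simp only [geCollectInto, List.foldl_cons, ih]

theorem ge_collectInto_nomatch (ns : PySem.Set String) (k : String × String)
    (l : List (List (String × String))) (h : ∀ e ∈ l, geKeyOf e ≠ k) :
    geCollectInto ns k l = ns := by
  induction l generalizing ns with
  | nil => rfl
  | cons e t ih =>
    have hk : (geKeyOf e == k) = false := by simp [h e (by simp)]
    simp only [geCollectInto, hk, Bool.false_eq_true, if_false]
    exact ih ns (fun x hx => h x (by simp [hx]))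

-- the middle layer's fold, characterized by geNewGroups
theorem ge_mid (edges : List (List (String × String)))
    (gB : PySem.Dict (String × String) (PySem.Dict String String × PySem.Set String))
    (hnd : gB.keys.Nodup) :
    (edges.foldl groupEdgeCollectB gB).items =
      gB.items.map (fun p => (p.1, (p.2.1, geCollectInto p.2.2 p.1 edges))) ++
        geNewGroups gB.keys edges := by
  induction edges generalizing gB with
  | nil =>
    simp [geNewGroups, geCollectInto]
  | cons e t ih =>
    simp only [List.foldl_cons, groupEdgeCollectB]
    cases hg : gB.get? (geKeyOf e) with
    | none =>
      have hcB : gB.contains (geKeyOf e) = false := by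
        rw [PySem.Dict.contains_eq_isSome_get?, hg]; rfl
      have hkmem : geKeyOf e ∉ gB.keys :=
        (PySem.Dict.get?_eq_none_iff_not_mem_keys gB (geKeyOf e)).mp hg
      have hnd' : (gB.insert (geKeyOf e)
          (PySem.Dict.ofList e, PySem.Set.ofList [geTrOf e])).keys.Nodup :=
        PySem.Dict.nodup_keys_insert _ _ _ hnd
      rw [ih _ hnd', PySem.Dict.items_insert_of_not_contains _ _ hcB,
        PySem.Dict.keys_insert_of_not_contains _ _ hcB, List.map_append, List.append_assoc]
      simp only [geNewGroups, hkmem, if_false, List.map_cons, List.map_nil, List.singleton_append]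
      congr 1
      apply List.map_congr_left
      intro p hp
      have hpk : geKeyOf e ≠ p.1 := fun h =>
        hkmem (h ▸ PySem.Dict.mem_keys_of_mem_items gB hp)
      have hb : (geKeyOf e == p.1) = false := by
        simp only [beq_eq_false_iff_ne]; exact hpk
      simp only [geCollectInto, hb, Bool.false_eq_true, if_false]
    | some v =>
      obtain ⟨fe, ns⟩ := v
      have hcB : gB.contains (geKeyOf e) = true := by
        rw [PySem.Dict.contains_eq_isSome_get?, hg]; rfl
      have hkmem : geKeyOf e ∈ gB.keys :=
        PySem.Dict.mem_keys_of_mem_items gB (PySem.Dict.mem_items_of_get?_eq_some gB hg)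
      have hkeys' : (gB.insert (geKeyOf e) (fe, ns.add (geTrOf e))).keys = gB.keys := by
        simp only [PySem.Dict.keys, PySem.Dict.items_insert_of_contains _ _ hcB, List.map_map]
        apply List.map_congr_left
        intro p hp
        by_cases hpk : p.1 = geKeyOf e
        · simp [Function.comp, hpk]
        · simp [Function.comp, hpk]
      have hnd' := hkeys' ▸ hnd
      rw [ih _ hnd', PySem.Dict.items_insert_of_contains _ _ hcB, hkeys', List.map_map]
      simp only [geNewGroups, hkmem, if_true]
      congr 1
      apply List.map_congr_left
      intro p hp
      by_cases hpk : p.1 = geKeyOf e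
      · have hpe := ge_items_unique gB hnd hp
          (PySem.Dict.mem_items_of_get?_eq_some gB hg) hpk
        subst hpe
        simp only [Function.comp, BEq.rfl, if_true]
        simp only [geCollectInto, BEq.rfl, if_true]
      · have hb : (p.1 == geKeyOf e) = false := by simp [hpk]
        have hb' : (geKeyOf e == p.1) = false := by
          simp only [beq_eq_false_iff_ne]; exact fun h => hpk h.symm
        simp only [Function.comp, hb, Bool.false_eq_true, if_false]
        simp only [geCollectInto, hb', Bool.false_eq_true, if_false]

-- B's fold, characterized by geNewGroups
theorem ge_b_fold (edges pre suf : List (List (String × String)))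
    (res : List (List (String × String))) (ks : List (String × String))
    (he : edges = pre ++ suf) (hks : ∀ p ∈ pre, geKeyOf p ∈ ks) :
    (suf.foldl (geStepB edges) (res, ks)).1 =
      res ++ (geNewGroups ks suf).map
        (fun p => (p.2.1.insert "task_ref_name" (PySem.Str.join ", " p.2.2)).items) := by
  induction suf generalizing pre res ks with
  | nil => simp [geNewGroups]
  | cons e t ih =>
    simp only [List.foldl_cons, geStepB, geNewGroups]
    by_cases hk : geKeyOf e ∈ ks
    · simp only [hk, if_true]
      exact ih (pre ++ [e]) res ks (by simp [he]) (by
        intro p hp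
        rcases List.mem_append.mp hp with hp | hp
        · exact hks p hp
        · simp only [List.mem_singleton] at hp; subst hp; exact hk)
    · simp only [hk, if_false]
      have hnames : geCollectNames edges (geKeyOf e) =
          geCollectInto (PySem.Set.ofList [geTrOf e]) (geKeyOf e) t := by
        rw [geCollectNames, he, ← ge_collectInto_foldl]
        have h1 : geCollectInto PySem.Set.empty (geKeyOf e) pre = PySem.Set.empty :=
          ge_collectInto_nomatch _ _ pre (fun p hp h => hk (h ▸ hks p hp))
        have h2 : geCollectInto PySem.Set.empty (geKeyOf e) (pre ++ e :: t) =
            geCollectInto (geCollectInto PySem.Set.empty (geKeyOf e) pre) (geKeyOf e) (e :: t) := by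
          rw [ge_collectInto_foldl, ge_collectInto_foldl, ge_collectInto_foldl, List.foldl_append]
        rw [h2, h1]
        simp only [geCollectInto, BEq.rfl, if_true]
        rfl
      rw [ih (pre ++ [e]) _ (ks ++ [geKeyOf e]) (by simp [he]) (by
        intro p hp
        rcases List.mem_append.mp hp with hp | hp
        · exact List.mem_append_left _ (hks p hp)
        · simp only [List.mem_singleton] at hp; subst hp
          exact List.mem_append_right _ (by simp))]
      simp only [List.map_cons, hnames, List.append_assoc, List.singleton_append]

-- ===== VERDICT (by name: the statement is the Claim_ definition above) =====
theorem group_edge_spec : Claim_equal_group_edge := by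
  intro edges _ hpre
  unfold Spec_group_edge group_edge group_edge_alt
  have hInv0 : geInv PySem.Dict.empty PySem.Set.empty PySem.Dict.empty :=
    ⟨rfl, List.nodup_nil, by intro p hp; exact absurd hp (by simp [PySem.Dict.empty]),
     by intro k1 k2 n; constructor
        · intro h; exact absurd h (by simp [PySem.Set.empty])
        · rintro ⟨fe, ns, h, -⟩; exact absurd h (by simp [PySem.Dict.empty])⟩
  have hA := ge_fold edges PySem.Dict.empty PySem.Set.empty PySem.Dict.empty hpre hInv0
  have hMid := ge_mid edges PySem.Dict.empty (by exact List.nodup_nil)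
  have hB := ge_b_fold edges [] edges [] [] rfl (by intro p hp; exact absurd hp (by simp))
  rw [hB, List.nil_append]
  simp only [PySem.Dict.values, hA, hMid, List.map_map]
  simp only [show (PySem.Dict.empty :
      PySem.Dict (String × String) (PySem.Dict String String × PySem.Set String)).items = []
    from rfl, List.map_nil, List.nil_append,
    show (PySem.Dict.empty :
      PySem.Dict (String × String) (PySem.Dict String String × PySem.Set String)).keys = []
    from rfl]
  apply List.map_congr_left
  intro p _
  rfl
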